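-- pv_equiv track=rewrite | github.com/miliar/Code_Jam_Webscraper | Solutions_python/Problem_155/3111.py | calculaAmigos
-- ===== SOURCE A (Python) =====
-- def calculaAmigos(listaDeTimidez):
-- 	amigos = 0
-- 	especConq = 0
-- 	for nivel in range(len(listaDeTimidez)):
-- 		if nivel > amigos + especConq:
-- 			amigos += nivel - (amigos + especConq)
-- 		especConq += listaDeTimidez[nivel]
-- 	return amigos
-- ===== SOURCE B (Python) =====
-- def calculaAmigos(listaDeTimidez):
--     # Stage 1: prefix sums (sum of levels strictly before each index).
--     prefijos = []
--     total = 0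
--     for timidez in listaDeTimidez:
--         prefijos.append(total)
--         total += timidez
--     # Stage 2: deficits nivel - prefijo, one per index.
--     deficits = [nivel - prefijo for nivel, prefijo in enumerate(prefijos)]
--     # Stage 3: the answer is the largest deficit (0 if there are no people).
--     return max(deficits, default=0)
-- ===== Notes on version B (the rewrite author's own statement) =====
-- stated objective: simpler
-- what changed: B replaces A's single feedback-coupled loop (conditional increment against amigos+especConq) with three staged passes: materialise the prefix-sum list, map it to a list of deficits nivel - prefijo, and take the maximum of that list (default 0).
import Mathlib
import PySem

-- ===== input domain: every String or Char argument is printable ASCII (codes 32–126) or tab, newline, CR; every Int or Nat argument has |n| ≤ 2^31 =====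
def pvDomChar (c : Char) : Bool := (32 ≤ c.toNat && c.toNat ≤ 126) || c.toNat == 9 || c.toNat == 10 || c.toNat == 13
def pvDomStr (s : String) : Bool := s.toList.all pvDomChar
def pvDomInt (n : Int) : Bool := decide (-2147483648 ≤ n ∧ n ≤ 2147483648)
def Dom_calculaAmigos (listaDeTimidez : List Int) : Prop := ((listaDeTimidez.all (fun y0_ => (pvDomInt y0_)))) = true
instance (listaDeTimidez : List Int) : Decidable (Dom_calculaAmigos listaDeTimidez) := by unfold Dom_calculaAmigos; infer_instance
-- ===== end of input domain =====

-- B replaces A's single feedback-coupled loop with three staged passes (prefix-sum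
-- list, deficit list, max with default 0): a simpler decomposition, same O(n) cost.

-- ===== PORT A =====
-- state (amigos, especConq); loop over range(len(listaDeTimidez)), indexing the list
def calculaAmigos (listaDeTimidez : List Int) : Int :=
  ((PySem.List.pyRange 0 (PySem.List.len listaDeTimidez) 1).foldl
    (fun (st : Int × Int) nivel =>
      (if nivel > st.1 + st.2 then st.1 + (nivel - (st.1 + st.2)) else st.1,
       st.2 + PySem.List.pyGetD listaDeTimidez nivel 0))   -- index always in range, so getD 0 is exact
    (0, 0)).1

-- ===== PORT B =====
-- stage 1: build the prefix-sum list (state (prefijos, total));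
-- stage 2: map enumerate(prefijos) to deficits; stage 3: max(deficits, default=0)
def calculaAmigos_alt (listaDeTimidez : List Int) : Int :=
  let st := listaDeTimidez.foldl
    (fun (st : List Int × Int) timidez => (st.1 ++ [st.2], st.2 + timidez)) ([], 0)
  let deficits := (PySem.List.enumerate st.1 0).map (fun p => p.1 - p.2)
  (PySem.List.max? deficits (fun y => y)).getD 0

-- ===== PRECONDITION & SPEC =====
def Spec_calculaAmigos (listaDeTimidez : List Int) (out : Int) : Prop := out = calculaAmigos_alt listaDeTimidez
instance (listaDeTimidez : List Int) (out : Int) : Decidable (Spec_calculaAmigos listaDeTimidez out) := by unfold Spec_calculaAmigos; infer_instance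

-- ===== CLAIM (what is proved, stated in full; the proofs are below) =====
def Claim_equal_calculaAmigos : Prop := ∀ (listaDeTimidez : List Int), Dom_calculaAmigos listaDeTimidez → Spec_calculaAmigos listaDeTimidez (calculaAmigos listaDeTimidez)

-- ===== LEMMAS AND PROOFS =====

-- deficit sequence: pvDef l i0 s lists (index − prefix sum) for each element of l
def pvDef : List Int → Int → Int → List Int
  | [], _, _ => []
  | t :: ts, i0, s => (i0 - s) :: pvDef ts (i0 + 1) (s + t)

-- prefix-sum sequence built by B's first stage
def pvPref : List Int → Int → List Int
  | [], _ => []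
  | t :: ts, s => s :: pvPref ts (s + t)

-- A's fold over enumerate computes the running max of the deficit sequence
lemma pv_A_fold (l : List Int) : ∀ (a s i0 : Int),
    ((PySem.List.enumerate l i0).foldl
      (fun (st : Int × Int) (p : Int × Int) =>
        (if p.1 > st.1 + st.2 then st.1 + (p.1 - (st.1 + st.2)) else st.1,
         st.2 + p.2)) (a, s)).1
      = (pvDef l i0 s).foldl max a := by
  induction l with
  | nil => intro a s i0; rfl
  | cons t ts ih =>
      intro a s i0
      rw [PySem.List.enumerate_cons]
      simp only [List.foldl_cons, pvDef]
      have h1 : (if i0 > a + s then a + (i0 - (a + s)) else a) = max a (i0 - s) := by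
        split_ifs with h <;> omega
      rw [h1]
      exact ih (max a (i0 - s)) (s + t) (i0 + 1)

-- B's first stage appends the prefix-sum sequence
lemma pv_B_fold (l : List Int) : ∀ (ps : List Int) (s : Int),
    (l.foldl (fun (st : List Int × Int) t => (st.1 ++ [st.2], st.2 + t)) (ps, s)).1
      = ps ++ pvPref l s := by
  induction l with
  | nil => intro ps s; simp [pvPref]
  | cons t ts ih =>
      intro ps s
      simp only [List.foldl_cons, pvPref]
      rw [ih (ps ++ [s]) (s + t)]
      simp

-- enumerating the prefix sums and subtracting gives the deficit sequence
lemma pv_enum_pref (l : List Int) : ∀ (i0 s : Int),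
    (PySem.List.enumerate (pvPref l s) i0).map (fun p => p.1 - p.2) = pvDef l i0 s := by
  induction l with
  | nil => intro i0 s; rfl
  | cons t ts ih =>
      intro i0 s
      simp only [pvPref, pvDef, PySem.List.enumerate_cons, List.map_cons]
      rw [ih (i0 + 1) (s + t)]

theorem calculaAmigos_equiv (l : List Int) : calculaAmigos l = calculaAmigos_alt l := by
  have hA : calculaAmigos l = (pvDef l 0 0).foldl max 0 := by
    have h := pv_A_fold l 0 0 0
    rw [PySem.List.enumerate_eq_map_pyRange l 0, List.foldl_map] at h
    exact h
  have hB : calculaAmigos_alt l = (pvDef l 0 0).foldl max 0 := by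
    unfold calculaAmigos_alt
    simp only [pv_B_fold l [] 0, List.nil_append, pv_enum_pref l 0 0]
    cases l with
    | nil => rfl
    | cons t ts =>
        simp only [pvDef]
        rw [PySem.List.max?_id_cons]
        simp only [Option.getD_some, List.foldl_cons]
        norm_num
  rw [hA, hB]

-- ===== VERDICT (by name: the statement is the Claim_ definition above) =====
theorem calculaAmigos_spec : Claim_equal_calculaAmigos := by
  intro l _
  unfold Spec_calculaAmigos
  exact calculaAmigos_equiv l
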